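-- pv_equiv track=rewrite | github.com/elmines/preprocessing | corpus.py | filter_by_length
-- ===== SOURCE A (Python) =====
-- def filter_by_length(prompts, answers, min_line_length, max_line_length):
-- 	"""
-- 	:param list(list(str))         prompts: The prompts to be filtered, where prompts[i][j] is the jth token of the ith prompt
-- 	:param list(list(str))         answers: The responses to be filtered
-- 	:param int             min_line_length: Minimum number of tokens that a prompt and its response must each have for the exchange to be retained
-- 	:param int             max_line_length: Maximum number of tokens that a prompt and its response may each have for the exchange to be retained
--
-- 	:returns: Tuple (prompts, answers) such that all prompts and answers are within the given length bounds
-- 	:rtype: tuple(list(list(str)),list(list(str)))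
-- 	"""
-- 	# Filter out the prompts that are too short/long
-- 	short_prompts_temp = []
-- 	short_answers_temp = []
-- 	for (i, prompt) in enumerate(prompts):
-- 		if len(prompt) >= min_line_length and len(prompt) <= max_line_length:
-- 			short_prompts_temp.append(prompt)
-- 			short_answers_temp.append(answers[i])
-- 	# Filter out the answers that are too short/long
-- 	short_prompts = []
-- 	short_answers = []
-- 	for (i, answer) in enumerate(short_answers_temp):
-- 		if len(answer) >= min_line_length and len(answer) <= max_line_length:
-- 	        	short_answers.append(answer)
-- 	        	short_prompts.append(short_prompts_temp[i])
-- 	return (short_prompts, short_answers)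
-- ===== SOURCE B (Python) =====
-- def filter_by_length(prompts, answers, min_line_length, max_line_length):
--     """Index-set formulation: compute the kept indices once, then build both
--     output lists by comprehension over that index set."""
--     ok = lambda line: min_line_length <= len(line) <= max_line_length
--     keep = [i for i in range(len(prompts)) if ok(prompts[i]) and ok(answers[i])]
--     return ([prompts[i] for i in keep], [answers[i] for i in keep])
-- ===== Notes on version B (the rewrite author's own statement) =====
-- stated objective: idiomatic
-- what changed: Replaces A's two staged filtering passes with accumulator lists by an index-set formulation: one comprehension computes the kept indices, and the two result lists are built by mapping over that index set.
import Mathlib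
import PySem

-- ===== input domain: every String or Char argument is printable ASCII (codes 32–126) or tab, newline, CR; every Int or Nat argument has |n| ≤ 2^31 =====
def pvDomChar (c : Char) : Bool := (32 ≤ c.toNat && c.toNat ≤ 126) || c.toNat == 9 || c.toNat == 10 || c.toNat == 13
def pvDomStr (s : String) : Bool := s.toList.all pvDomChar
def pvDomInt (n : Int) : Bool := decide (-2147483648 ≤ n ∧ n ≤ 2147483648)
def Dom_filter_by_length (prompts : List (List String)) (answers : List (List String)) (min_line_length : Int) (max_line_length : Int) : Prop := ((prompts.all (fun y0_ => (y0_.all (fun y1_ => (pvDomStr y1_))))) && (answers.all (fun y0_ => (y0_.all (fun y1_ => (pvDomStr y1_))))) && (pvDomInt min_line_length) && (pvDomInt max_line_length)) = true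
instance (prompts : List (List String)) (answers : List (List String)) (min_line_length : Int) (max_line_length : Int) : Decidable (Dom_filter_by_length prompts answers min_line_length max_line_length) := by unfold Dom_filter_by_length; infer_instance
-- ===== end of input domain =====

-- B replaces A's two staged filtering passes by an index-set formulation (compute kept indices, then map); same cost.


-- ===== PORT A =====
-- first loop of A: over prompts with running index i, keep prompt and answers[i]
-- (answers[i] ported with pyGet?; Pre_ guarantees the index is in range, the .getD [] never fires there)
def pvA_loop1 (answers : List (List String)) (mn mx : Int) : List (List String) → Nat → List (List String) × List (List String)
  | [], _ => ([], [])
  | p :: ps, i =>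
    let r := pvA_loop1 answers mn mx ps (i + 1)
    if (p.length : Int) ≥ mn ∧ (p.length : Int) ≤ mx then
      (p :: r.1, ((PySem.List.pyGet? answers (i : Int)).getD []) :: r.2)
    else r

-- second loop of A: over short_answers_temp with running index i, re-indexing short_prompts_temp[i]
def pvA_loop2 (pt : List (List String)) (mn mx : Int) : List (List String) → Nat → List (List String) × List (List String)
  | [], _ => ([], [])
  | a :: as_, i =>
    let r := pvA_loop2 pt mn mx as_ (i + 1)
    if (a.length : Int) ≥ mn ∧ (a.length : Int) ≤ mx then
      (((PySem.List.pyGet? pt (i : Int)).getD []) :: r.1, a :: r.2)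
    else r

def filter_by_length (prompts : List (List String)) (answers : List (List String)) (min_line_length : Int) (max_line_length : Int) : List (List String) × List (List String) :=
  let temp := pvA_loop1 answers min_line_length max_line_length prompts 0
  pvA_loop2 temp.1 min_line_length max_line_length temp.2 0

-- ===== PORT B =====
-- B: `ok` bounds test; `keep` = the comprehension over range(len(prompts)); two maps over `keep`
def pvB_ok (mn mx : Int) (line : List String) : Bool :=
  decide (mn ≤ (line.length : Int) ∧ (line.length : Int) ≤ mx)

def pvB_aget (answers : List (List String)) (i : Nat) : List String :=
  (PySem.List.pyGet? answers (i : Int)).getD []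

def pvB_keep (prompts answers : List (List String)) (mn mx : Int) : List Nat :=
  (List.range prompts.length).filter
    (fun i => pvB_ok mn mx (prompts.getD i []) && pvB_ok mn mx (pvB_aget answers i))

def filter_by_length_alt (prompts : List (List String)) (answers : List (List String)) (min_line_length : Int) (max_line_length : Int) : List (List String) × List (List String) :=
  let keep := pvB_keep prompts answers min_line_length max_line_length
  (keep.map (fun i => prompts.getD i []), keep.map (fun i => pvB_aget answers i))

-- ===== PRECONDITION & SPEC =====
-- Pre_ excludes exactly the inputs on which Python A raises IndexError: some prompt within bounds
-- whose index is not a valid index into answers (B raises there too).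
def Pre_filter_by_length (prompts : List (List String)) (answers : List (List String)) (min_line_length : Int) (max_line_length : Int) : Prop :=
  ∀ i < prompts.length,
    (min_line_length ≤ ((prompts.getD i []).length : Int) ∧ ((prompts.getD i []).length : Int) ≤ max_line_length) →
    i < answers.length
instance (prompts : List (List String)) (answers : List (List String)) (min_line_length : Int) (max_line_length : Int) : Decidable (Pre_filter_by_length prompts answers min_line_length max_line_length) := by unfold Pre_filter_by_length; infer_instance

def pvWitness_filter_by_length : List (List String) × List (List String) × Int × Int :=
  ([["a"], ["b", "c"], []], [["x"], ["y", "z"], ["w"]], 1, 2)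

def Spec_filter_by_length (prompts : List (List String)) (answers : List (List String)) (min_line_length : Int) (max_line_length : Int) (out : List (List String) × List (List String)) : Prop := out = filter_by_length_alt prompts answers min_line_length max_line_length
instance (prompts : List (List String)) (answers : List (List String)) (min_line_length : Int) (max_line_length : Int) (out : List (List String) × List (List String)) : Decidable (Spec_filter_by_length prompts answers min_line_length max_line_length out) := by unfold Spec_filter_by_length; infer_instance

-- ===== CLAIM (what is proved, stated in full; the proofs are below) =====
def Claim_equal_filter_by_length : Prop := ∀ (prompts : List (List String)) (answers : List (List String)) (min_line_length : Int) (max_line_length : Int), Dom_filter_by_length prompts answers min_line_length max_line_length → Pre_filter_by_length prompts answers min_line_length max_line_length → Spec_filter_by_length prompts answers min_line_length max_line_length (filter_by_length prompts answers min_line_length max_line_length)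

-- ===== LEMMAS AND PROOFS =====

-- proof-side intermediate: a single pair-testing loop over prompts with running index
def pvMid_loop (answers : List (List String)) (mn mx : Int) : List (List String) → Nat → List (List String) × List (List String)
  | [], _ => ([], [])
  | p :: ps, i =>
    let r := pvMid_loop answers mn mx ps (i + 1)
    if mn ≤ (p.length : Int) ∧ (p.length : Int) ≤ mx then
      let a := (PySem.List.pyGet? answers (i : Int)).getD []
      if mn ≤ (a.length : Int) ∧ (a.length : Int) ≤ mx then (p :: r.1, a :: r.2) else r
    else r

-- the two components of loop1's result have the same length
theorem pvA_loop1_len (answers : List (List String)) (mn mx : Int) :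
    ∀ (ps : List (List String)) (i : Nat),
      (pvA_loop1 answers mn mx ps i).1.length = (pvA_loop1 answers mn mx ps i).2.length := by
  intro ps
  induction ps with
  | nil => intro i; simp [pvA_loop1]
  | cons p ps ih =>
    intro i
    simp only [pvA_loop1]
    split <;> simp [ih]

-- structural recursion on both kept lists at once: what loop2 computes when pt[i..] pairs with as
def pvPairFilter (mn mx : Int) : List (List String) → List (List String) → List (List String) × List (List String)
  | _, [] => ([], [])
  | [], _ :: _ => ([], [])
  | p :: pt, a :: as_ =>
    let r := pvPairFilter mn mx pt as_
    if (a.length : Int) ≥ mn ∧ (a.length : Int) ≤ mx then (p :: r.1, a :: r.2) else r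

theorem pvA_loop2_eq_pairFilter (mn mx : Int) :
    ∀ (as_ pt : List (List String)) (i : Nat), pt.length = i + as_.length →
      pvA_loop2 pt mn mx as_ i = pvPairFilter mn mx (pt.drop i) as_ := by
  intro as_
  induction as_ with
  | nil =>
    intro pt i h
    cases hd : pt.drop i <;> simp [pvA_loop2, pvPairFilter]
  | cons a as_ ih =>
    intro pt i h
    simp only [List.length_cons] at h
    have hi : i < pt.length := by omega
    have hdrop : pt.drop i = pt[i] :: pt.drop (i + 1) := List.drop_eq_getElem_cons hi
    have hget : PySem.List.pyGet? pt (i : Int) = some pt[i] := by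
      rw [PySem.List.pyGet?_natCast]; exact List.getElem?_eq_getElem hi
    simp only [pvA_loop2, hdrop, pvPairFilter, hget, Option.getD_some]
    rw [ih pt (i + 1) (by omega)]

-- the composition of A's pair-keeping loop1 with pvPairFilter equals the single-pass intermediate
theorem pvPairFilter_loop1_eq_pvMid (answers : List (List String)) (mn mx : Int) :
    ∀ (ps : List (List String)) (i : Nat),
      pvPairFilter mn mx (pvA_loop1 answers mn mx ps i).1 (pvA_loop1 answers mn mx ps i).2
        = pvMid_loop answers mn mx ps i := by
  intro ps
  induction ps with
  | nil => intro i; simp [pvA_loop1, pvMid_loop, pvPairFilter]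
  | cons p ps ih =>
    intro i
    simp only [pvA_loop1, pvMid_loop]
    by_cases hp : (p.length : Int) ≥ mn ∧ (p.length : Int) ≤ mx
    · have hp' : mn ≤ (p.length : Int) ∧ (p.length : Int) ≤ mx := ⟨hp.1, hp.2⟩
      rw [if_pos hp, if_pos hp']
      simp only [pvPairFilter]
      by_cases ha : ((((PySem.List.pyGet? answers (i : Int)).getD []).length : Int) ≥ mn
          ∧ (((PySem.List.pyGet? answers (i : Int)).getD []).length : Int) ≤ mx)
      · rw [if_pos ha, if_pos ⟨ha.1, ha.2⟩, ih]
      · rw [if_neg ha, if_neg (by exact fun h => ha ⟨h.1, h.2⟩), ih]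
    · rw [if_neg hp, if_neg (fun h => hp ⟨h.1, h.2⟩), ih]

-- the single-pass intermediate equals B's index-set formulation, with running offset i
theorem pvMid_eq_keep (answers : List (List String)) (mn mx : Int) :
    ∀ (ps : List (List String)) (i : Nat),
      pvMid_loop answers mn mx ps i =
        (((List.range ps.length).filter
            (fun j => pvB_ok mn mx (ps.getD j []) && pvB_ok mn mx (pvB_aget answers (i + j)))).map
              (fun j => ps.getD j []),
         ((List.range ps.length).filter
            (fun j => pvB_ok mn mx (ps.getD j []) && pvB_ok mn mx (pvB_aget answers (i + j)))).map
              (fun j => pvB_aget answers (i + j))) := by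
  intro ps
  induction ps with
  | nil => intro i; simp [pvMid_loop]
  | cons p ps ih =>
    intro i
    have hrange : List.range (ps.length + 1) = 0 :: (List.range ps.length).map Nat.succ :=
      List.range_succ_eq_map
    have hfilt :
        (List.range ps.length).filter
            ((fun j => pvB_ok mn mx ((p :: ps).getD j []) && pvB_ok mn mx (pvB_aget answers (i + j))) ∘ Nat.succ)
          = (List.range ps.length).filter
            (fun j => pvB_ok mn mx (ps.getD j []) && pvB_ok mn mx (pvB_aget answers (i + 1 + j))) := by
      apply List.filter_congr
      intro j _
      have : i + Nat.succ j = i + 1 + j := by omega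
      simp [Function.comp, this]
    have ha : ∀ j : Nat, i + Nat.succ j = i + 1 + j := by intro j; omega
    simp only [pvMid_loop, List.length_cons, hrange, List.filter_cons, List.filter_map, hfilt,
      ih (i + 1)]
    by_cases hp : mn ≤ (p.length : Int) ∧ (p.length : Int) ≤ mx
    · rw [if_pos hp]
      by_cases hq : mn ≤ ((pvB_aget answers i).length : Int) ∧ ((pvB_aget answers i).length : Int) ≤ mx
      · have h0 : (pvB_ok mn mx ((p :: ps).getD 0 []) && pvB_ok mn mx (pvB_aget answers (i + 0))) = true := by
          simp [pvB_ok, hp.1, hp.2, hq.1, hq.2]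
        rw [if_pos ⟨hq.1, hq.2⟩, h0, if_pos rfl]
        simp only [Prod.mk.injEq, List.map_cons, List.map_map]
        refine ⟨?_, ?_⟩
        · congr 1
        · congr 1
          apply List.map_congr_left
          intro j _
          simp only [Function.comp_apply]
          congr 1
          omega
      · have h0 : (pvB_ok mn mx ((p :: ps).getD 0 []) && pvB_ok mn mx (pvB_aget answers (i + 0))) = false := by
          simp only [pvB_ok, Bool.and_eq_false_iff, decide_eq_false_iff_not]
          right; intro h; exact hq (by simpa [pvB_aget] using h)
        rw [if_neg (by intro h; exact hq (by simpa [pvB_aget] using h)), h0]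
        simp only [Bool.false_eq_true, if_false, Prod.mk.injEq, List.map_map]
        refine ⟨?_, ?_⟩ <;>
        · apply List.map_congr_left
          intro j _
          simp [Function.comp, ha j]
    · rw [if_neg hp]
      have h0 : (pvB_ok mn mx ((p :: ps).getD 0 []) && pvB_ok mn mx (pvB_aget answers (i + 0))) = false := by
        simp only [pvB_ok, Bool.and_eq_false_iff, decide_eq_false_iff_not]
        left; intro h; exact hp h
      rw [h0]
      simp only [Bool.false_eq_true, if_false, Prod.mk.injEq, List.map_map]
      refine ⟨?_, ?_⟩ <;>
      · apply List.map_congr_left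
        intro j _
        simp [Function.comp, ha j]

-- ===== VERDICT (by name: the statement is the Claim_ definition above) =====
theorem filter_by_length_spec : Claim_equal_filter_by_length := by
  intro prompts answers mn mx _ _
  unfold Spec_filter_by_length filter_by_length filter_by_length_alt pvB_keep
  rw [pvA_loop2_eq_pairFilter mn mx _ _ 0 (by simpa using pvA_loop1_len answers mn mx prompts 0)]
  rw [List.drop_zero, pvPairFilter_loop1_eq_pvMid answers mn mx prompts 0]
  simpa using pvMid_eq_keep answers mn mx prompts 0
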